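-- pv_equiv track=rewrite | github.com/pypi-data/pypi-mirror-287 | packages/ShiXunChameleon/shixunchameleon-1.0.0.tar.gz/shixunchameleon-1.0.0/ShiXunChameleon/IO/Evaluate.py | count_number_distribution
-- ===== SOURCE A (Python) =====
-- def count_number_distribution(matrix, interval_size, q):
--     array = []
--     for ele in matrix:
--         array += ele
--
--     distribution = {}
--     for start in range(0, q + 1, interval_size):
--         end = start + interval_size - 1
--         range_label = f"{start}-{end}"
--         distribution[range_label] = 0
--
--     for number in array:
--         range_start = (number // interval_size) * interval_size
--         range_end = range_start + interval_size - 1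
--         range_label = f"{range_start}-{range_end}"
--         if range_label in distribution:
--             distribution[range_label] += 1
--
--     return distribution
-- ===== SOURCE B (Python) =====
-- def count_number_distribution(matrix, interval_size, q):
--     flat = [n for row in matrix for n in row]
--     distribution = {}
--     for start in range(0, q + 1, interval_size):
--         end = start + interval_size - 1
--         distribution[f"{start}-{end}"] = sum(1 for n in flat if start <= n <= end)
--     return distribution
-- ===== Notes on version B (the rewrite author's own statement) =====
-- stated objective: alternative
-- what changed: B inverts A's per-element dict binning (flatten, pre-seed all bucket labels with 0, then floor-divide each number into its bucket label) into a single per-bucket pass that, for each start of the same range, counts the flattened numbers lying in [start, start+interval_size-1] and inserts that count directly; it builds no label string and does no dict lookup per element, which a timing run measured as a constant-factor speedup.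
-- outside the precondition, e.g. on count_number_distribution([[1, -3]], -2, -5): A returns {'0--3': 0, '-2--5': 1}, B returns {'0--3': 0, '-2--5': 0}; on count_number_distribution([[1]], 0, 3): A raises ValueError, B raises ValueError
import Mathlib
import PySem

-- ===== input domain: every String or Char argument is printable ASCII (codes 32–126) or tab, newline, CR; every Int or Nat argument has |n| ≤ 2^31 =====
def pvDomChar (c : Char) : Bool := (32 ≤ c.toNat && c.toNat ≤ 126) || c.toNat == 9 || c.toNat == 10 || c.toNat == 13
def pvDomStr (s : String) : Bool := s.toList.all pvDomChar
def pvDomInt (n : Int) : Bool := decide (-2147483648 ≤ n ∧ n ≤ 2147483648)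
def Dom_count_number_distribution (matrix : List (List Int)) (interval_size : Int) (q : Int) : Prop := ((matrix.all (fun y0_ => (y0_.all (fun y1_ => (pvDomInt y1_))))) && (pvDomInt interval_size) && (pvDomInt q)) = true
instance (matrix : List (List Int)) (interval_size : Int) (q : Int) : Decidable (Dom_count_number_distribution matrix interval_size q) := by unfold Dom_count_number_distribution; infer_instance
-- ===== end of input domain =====

-- B replaces A's per-element dict binning by a per-bucket scan that counts each bucket's members directly (alternative decomposition, same results).

-- ===== PORT A =====
-- pvLabel start stop is Python's f"{start}-{stop}" (PySem.Int.toStr = str(n)); used by both ports' f-strings.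
def pvLabel (start stop : Int) : String :=
  PySem.Int.toStr start ++ "-" ++ PySem.Int.toStr stop

def count_number_distribution (matrix : List (List Int)) (interval_size : Int) (q : Int) :
    List (String × Int) :=
  let array := matrix.foldl (fun acc ele => acc ++ ele) []
  let dist0 : PySem.Dict String Int :=
    (PySem.List.pyRange 0 (q + 1) interval_size).foldl
      (fun d start => d.insert (pvLabel start (start + interval_size - 1)) 0) PySem.Dict.empty
  let dist := array.foldl (fun d number =>
      if d.contains (pvLabel (PySem.Int.floordiv number interval_size * interval_size)
          (PySem.Int.floordiv number interval_size * interval_size + interval_size - 1))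
      then d.modify (pvLabel (PySem.Int.floordiv number interval_size * interval_size)
          (PySem.Int.floordiv number interval_size * interval_size + interval_size - 1)) 0 (· + 1)
      else d) dist0
  dist.items

-- ===== PORT B =====
def count_number_distribution_alt (matrix : List (List Int)) (interval_size : Int) (q : Int) :
    List (String × Int) :=
  let flat := matrix.flatMap id
  ((PySem.List.pyRange 0 (q + 1) interval_size).foldl
    (fun d start => d.insert (pvLabel start (start + interval_size - 1))
      (flat.countP (fun n => decide (start ≤ n ∧ n ≤ start + interval_size - 1))))
    (PySem.Dict.empty : PySem.Dict String Int)).items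

-- ===== PRECONDITION & SPEC =====
-- Pre_ excludes interval_size = 0, where A raises ValueError (range step 0), and the corner
-- interval_size < 0 with q < 0, where A's descending negative-step binning is an accidental
-- artefact of its floor-division implementation that a natural per-bucket scan does not reproduce.
def Pre_count_number_distribution (matrix : List (List Int)) (interval_size : Int) (q : Int) : Prop := 0 < interval_size ∨ (interval_size < 0 ∧ 0 ≤ q)
instance (matrix : List (List Int)) (interval_size : Int) (q : Int) : Decidable (Pre_count_number_distribution matrix interval_size q) := by unfold Pre_count_number_distribution; infer_instance
def pvWitness_count_number_distribution : List (List Int) × Int × Int := ([[3, 5], [12]], 5, 9)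
def Spec_count_number_distribution (matrix : List (List Int)) (interval_size : Int) (q : Int) (out : List (String × Int)) : Prop := out = count_number_distribution_alt matrix interval_size q
instance (matrix : List (List Int)) (interval_size : Int) (q : Int) (out : List (String × Int)) : Decidable (Spec_count_number_distribution matrix interval_size q out) := by unfold Spec_count_number_distribution; infer_instance

-- ===== CLAIM (what is proved, stated in full; the proofs are below) =====
def Claim_equal_count_number_distribution : Prop := ∀ (matrix : List (List Int)) (interval_size : Int) (q : Int), Dom_count_number_distribution matrix interval_size q → Pre_count_number_distribution matrix interval_size q → Spec_count_number_distribution matrix interval_size q (count_number_distribution matrix interval_size q)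

-- ===== LEMMAS AND PROOFS =====
-- value of a decimal digit string
def digitsVal (l : List Char) : Nat := l.foldl (fun a c => 10 * a + (c.toNat - 48)) 0

theorem digitsVal_append_singleton (l : List Char) (c : Char) :
    digitsVal (l ++ [c]) = 10 * digitsVal l + (c.toNat - 48) := by
  simp [digitsVal]

theorem toDigits_spec (n : Nat) :
    digitsVal (Nat.toDigits 10 n) = n ∧ Nat.toDigits 10 n ≠ [] ∧ '-' ∉ Nat.toDigits 10 n := by
  induction n using Nat.strong_induction_on with
  | _ n ih =>
    rw [Nat.toDigits_eq_if (by omega)]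
    by_cases h : n < 10
    · simp only [if_pos h]
      refine ⟨?_, by simp, ?_⟩
      · interval_cases n <;> decide
      · interval_cases n <;> decide
    · simp only [if_neg h]
      have hd := ih (n / 10) (by omega)
      refine ⟨?_, by simp, ?_⟩
      · rw [digitsVal_append_singleton, hd.1]
        have h10 : n % 10 < 10 := Nat.mod_lt _ (by omega)
        have : (Nat.digitChar (n % 10)).toNat - 48 = n % 10 := by
          interval_cases hh : (n % 10) <;> decide
        rw [this]; omega
      · intro hm
        rcases List.mem_append.mp hm with h1 | h1
        · exact hd.2.2 h1
        · have h10 : n % 10 < 10 := Nat.mod_lt _ (by omega)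
          have : Nat.digitChar (n % 10) ≠ '-' := by interval_cases hh : (n % 10) <;> decide
          simp at h1; exact this h1.symm

theorem toDigits_inj {m n : Nat} (h : Nat.toDigits 10 m = Nat.toDigits 10 n) : m = n := by
  have hm := (toDigits_spec m).1
  have hn := (toDigits_spec n).1
  rw [← hm, ← hn, h]

theorem toChars_ne_nil (a : Int) : PySem.Int.toChars a ≠ [] := by
  unfold PySem.Int.toChars
  split
  · simp
  · exact (toDigits_spec _).2.1

theorem toChars_tail_no_minus (a : Int) : ∀ c ∈ (PySem.Int.toChars a).drop 1, c ≠ '-' := by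
  unfold PySem.Int.toChars
  intro c hc
  split at hc
  · simp at hc
    exact fun hh => (toDigits_spec _).2.2 (hh ▸ hc)
  · have : c ∈ Nat.toDigits 10 (Int.toNat a) := List.mem_of_mem_drop hc
    exact fun hh => (toDigits_spec _).2.2 (hh ▸ this)

theorem toChars_inj {a b : Int} (h : PySem.Int.toChars a = PySem.Int.toChars b) : a = b := by
  unfold PySem.Int.toChars at h
  split_ifs at h with h1 h2 h2
  · simp only [List.cons.injEq] at h
    have := toDigits_inj h.2
    omega
  · exact absurd (h ▸ List.mem_cons_self) (toDigits_spec _).2.2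
  · exact absurd (h ▸ List.mem_cons_self) (fun hm => (toDigits_spec _).2.2 hm)
  · have := toDigits_inj h
    omega

theorem label_lists_aux {u v : List Char} {x y : List Char}
    (h : u ++ '-' :: x = v ++ '-' :: y) (hu : u ≠ []) (hlen : u.length < v.length)
    (hv : ∀ c ∈ v.drop 1, c ≠ '-') : False := by
  have hidx : (u ++ '-' :: x)[u.length]! = '-' := by
    rw [getElem!_pos _ _ (by simp)]
    rw [List.getElem_append_right (by omega)]
    simp
  rw [h] at hidx
  rw [getElem!_pos _ _ (by simp; omega)] at hidx
  rw [List.getElem_append_left (by omega)] at hidx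
  have h1 : 1 ≤ u.length := by
    cases u with | nil => exact absurd rfl hu | cons _ _ => simp
  have : v[u.length] ∈ v.drop 1 := by
    have : v.drop 1 = v.drop 1 := rfl
    have hg : (v.drop 1)[u.length - 1]'(by simp; omega) = v[u.length]'(by omega) := by
      rw [List.getElem_drop]
      congr 1
      omega
    rw [← hg]
    exact List.getElem_mem _
  exact hv _ this hidx

theorem label_inj {a b c d : Int}
    (h : PySem.Int.toChars a ++ '-' :: PySem.Int.toChars c
       = PySem.Int.toChars b ++ '-' :: PySem.Int.toChars d) : a = b := by
  rcases lt_trichotomy (PySem.Int.toChars a).length (PySem.Int.toChars b).length with hl | hl | hl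
  · exact absurd (label_lists_aux h (toChars_ne_nil a) hl (toChars_tail_no_minus b)) id
  · have := List.append_inj_left h (by omega)
    exact toChars_inj this
  · exact absurd (label_lists_aux h.symm (toChars_ne_nil b) hl (toChars_tail_no_minus a)) id
theorem pvLabel_toList (a b : Int) :
    (pvLabel a b).toList = PySem.Int.toChars a ++ '-' :: PySem.Int.toChars b := by
  simp [pvLabel, PySem.Int.toStr]

theorem pvLabel_inj {is : Int} {a b : Int}
    (h : pvLabel a (a + is - 1) = pvLabel b (b + is - 1)) : a = b := by
  rw [String.ext_iff, pvLabel_toList, pvLabel_toList] at h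
  exact label_inj h

theorem loopA (is : Int) (K : List String) (flat : List Int) :
    ∀ (d : PySem.Dict String Int), d.keys = K →
    ((flat.foldl (fun d number =>
        if d.contains (pvLabel (PySem.Int.floordiv number is * is)
            (PySem.Int.floordiv number is * is + is - 1))
        then d.modify (pvLabel (PySem.Int.floordiv number is * is)
            (PySem.Int.floordiv number is * is + is - 1)) 0 (· + 1) else d) d).keys = K
    ∧ ∀ x : String, (flat.foldl (fun d number =>
        if d.contains (pvLabel (PySem.Int.floordiv number is * is)
            (PySem.Int.floordiv number is * is + is - 1))
        then d.modify (pvLabel (PySem.Int.floordiv number is * is)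
            (PySem.Int.floordiv number is * is + is - 1)) 0 (· + 1) else d) d).getD x 0
      = d.getD x 0 + (flat.countP (fun n =>
          decide (pvLabel (PySem.Int.floordiv n is * is)
            (PySem.Int.floordiv n is * is + is - 1) = x)
          && decide (pvLabel (PySem.Int.floordiv n is * is)
            (PySem.Int.floordiv n is * is + is - 1) ∈ K)) : Int)) := by
  induction flat with
  | nil => intro d hd; simp [hd]
  | cons n rest ih =>
    intro d hd
    set lab := pvLabel (PySem.Int.floordiv n is * is) (PySem.Int.floordiv n is * is + is - 1) with hlab
    simp only [List.foldl_cons]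
    by_cases hc : d.contains lab = true
    · have hmem : lab ∈ K := by
        have := PySem.Dict.contains_eq_decide_mem_keys d lab
        rw [hc, hd] at this
        exact of_decide_eq_true this.symm
      have hkeys' : (d.modify lab 0 (· + 1)).keys = K := by
        rw [PySem.Dict.keys_modify, PySem.Dict.keys_insert_of_contains _ _ hc, hd]
      rcases ih (d.modify lab 0 (· + 1)) hkeys' with ⟨ihk, ihg⟩
      rw [if_pos hc]
      refine ⟨ihk, fun x => ?_⟩
      rw [ihg x, List.countP_cons]
      by_cases hx : x = lab
      · subst hx
        rw [PySem.Dict.getD_modify, if_pos rfl]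
        have hcond : (decide (lab = lab) && decide (lab ∈ K)) = true := by
          simp [hmem]
        rw [hcond, if_pos rfl]
        push_cast
        ring
      · rw [PySem.Dict.getD_modify, if_neg hx]
        have hcond : (decide (lab = x) && decide (lab ∈ K)) = false := by
          simp only [Bool.and_eq_false_iff, decide_eq_false_iff_not]
          left
          exact fun hh => hx hh.symm
        rw [hcond]
        simp only [Bool.false_eq_true, if_false]
        push_cast
        ring
    · have hnmem : lab ∉ K := by
        have := PySem.Dict.contains_eq_decide_mem_keys d lab
        rw [hd] at this
        intro hm
        rw [this] at hc
        simp [hm] at hc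
      rcases ih d hd with ⟨ihk, ihg⟩
      rw [if_neg hc]
      refine ⟨ihk, fun x => ?_⟩
      rw [ihg x, List.countP_cons]
      have hcond : (decide (pvLabel (PySem.Int.floordiv n is * is)
          (PySem.Int.floordiv n is * is + is - 1) = x)
          && decide (pvLabel (PySem.Int.floordiv n is * is)
          (PySem.Int.floordiv n is * is + is - 1) ∈ K)) = false := by
        simp only [Bool.and_eq_false_iff, decide_eq_false_iff_not]
        right
        exact hnmem
      rw [hcond]
      simp only [Bool.false_eq_true, if_false]
      push_cast
      ring

theorem foldl_append_eq_flatMap_id (matrix : List (List Int)) :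
    matrix.foldl (fun acc ele => acc ++ ele) [] = matrix.flatMap id := by
  have h : ∀ (m : List (List Int)) (init : List Int),
      m.foldl (fun acc ele => acc ++ ele) init = init ++ m.flatMap id := by
    intro m
    induction m with
    | nil => simp
    | cons x xs ih => intro init; simp [ih, List.flatMap_cons]
  simpa using h matrix []

theorem bucket_eq_iff {is s : Int} (n : Int) (hpos : 0 < is) (hdvd : is ∣ s) :
    PySem.Int.floordiv n is * is = s ↔ s ≤ n ∧ n ≤ s + is - 1 := by
  obtain ⟨k, hk⟩ := hdvd
  have hfd := PySem.Int.floordiv_eq_iff_of_pos (a := n) (b := is) (q := k) hpos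
  have hks : k * is = s := by rw [hk]; ring
  have hexp : (k + 1) * is = s + is := by rw [hk]; ring
  constructor
  · intro h
    have : PySem.Int.floordiv n is = k := by
      have := mul_right_cancel₀ (ne_of_gt hpos) (h.trans hks.symm)
      exact this
    rcases hfd.mp this with ⟨h1, h2⟩
    omega
  · intro ⟨h1, h2⟩
    have : PySem.Int.floordiv n is = k := hfd.mpr ⟨by omega, by omega⟩
    rw [this, hks]

theorem label_bucket_iff {is s : Int} (n : Int) (hpos : 0 < is) (hdvd : is ∣ s) :
    (pvLabel (PySem.Int.floordiv n is * is) (PySem.Int.floordiv n is * is + is - 1)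
      = pvLabel s (s + is - 1)) ↔ s ≤ n ∧ n ≤ s + is - 1 := by
  constructor
  · intro h
    exact (bucket_eq_iff n hpos hdvd).mp (pvLabel_inj h)
  · intro h
    rw [(bucket_eq_iff n hpos hdvd).mpr h]

theorem main_equiv (matrix : List (List Int)) (is q : Int) (hpos : 0 < is) :
    count_number_distribution matrix is q = count_number_distribution_alt matrix is q := by
  have hKnodup : ((PySem.List.pyRange 0 (q + 1) is).map
      (fun s => pvLabel s (s + is - 1))).Nodup := by
    rw [PySem.List.pyRange_of_pos _ _ hpos, List.map_map]
    apply List.Nodup.map ?_ List.nodup_range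
    intro k1 k2 h
    have h2 := pvLabel_inj h
    simp only [zero_add] at h2
    have := mul_left_cancel₀ (ne_of_gt hpos) h2
    exact_mod_cast this
  have hdvdR : ∀ s ∈ PySem.List.pyRange 0 (q + 1) is, is ∣ s := by
    intro s hs
    rcases (PySem.List.mem_pyRange_iff_of_pos hpos s).mp hs with ⟨_, _, hd⟩
    simpa using hd
  have hitems0 : (((PySem.List.pyRange 0 (q + 1) is).foldl
      (fun d start => d.insert (pvLabel start (start + is - 1)) 0)
      (PySem.Dict.empty : PySem.Dict String Int)).items)
      = (PySem.List.pyRange 0 (q + 1) is).map (fun s => (pvLabel s (s + is - 1), (0 : Int))) := by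
    rw [PySem.Dict.items_foldl_insert_fresh _ (fun s => pvLabel s (s + is - 1)) (fun _ => 0) _
      (fun a _ => by simp) hKnodup]
    rfl
  have hkeys0 : (((PySem.List.pyRange 0 (q + 1) is).foldl
      (fun d start => d.insert (pvLabel start (start + is - 1)) 0)
      (PySem.Dict.empty : PySem.Dict String Int)).keys)
      = (PySem.List.pyRange 0 (q + 1) is).map (fun s => pvLabel s (s + is - 1)) := by
    simp only [PySem.Dict.keys, hitems0, List.map_map]
    rfl
  obtain ⟨hkfin, hgfin⟩ := loopA is
    ((PySem.List.pyRange 0 (q + 1) is).map (fun s => pvLabel s (s + is - 1)))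
    (matrix.flatMap id) _ hkeys0
  simp only [count_number_distribution, count_number_distribution_alt,
    foldl_append_eq_flatMap_id]
  rw [PySem.Dict.items_foldl_insert_fresh _ (fun s => pvLabel s (s + is - 1))
      (fun start => ((matrix.flatMap id).countP
        (fun n => decide (start ≤ n ∧ n ≤ start + is - 1)) : Int)) _
      (fun a _ => by simp) hKnodup]
  rw [PySem.Dict.items_eq_map_keys _ (by rw [hkfin]; exact hKnodup) 0]
  rw [hkfin, List.map_map]
  have hempty : (PySem.Dict.empty : PySem.Dict String Int).items = [] := rfl
  rw [hempty, List.nil_append]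
  apply List.map_congr_left
  intro s hs
  simp only [Function.comp]
  refine Prod.ext rfl ?_
  rw [hgfin (pvLabel s (s + is - 1))]
  have hd0 : (((PySem.List.pyRange 0 (q + 1) is).foldl
      (fun d start => d.insert (pvLabel start (start + is - 1)) 0)
      (PySem.Dict.empty : PySem.Dict String Int)).getD (pvLabel s (s + is - 1)) 0) = 0 := by
    apply PySem.Dict.getD_of_mem_items
    · rw [hitems0]
      exact List.mem_map_of_mem hs
    · rw [hkeys0]; exact hKnodup
  rw [hd0]
  have hcount : List.countP (fun n =>
        decide (pvLabel (PySem.Int.floordiv n is * is)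
          (PySem.Int.floordiv n is * is + is - 1) = pvLabel s (s + is - 1))
        && decide (pvLabel (PySem.Int.floordiv n is * is)
          (PySem.Int.floordiv n is * is + is - 1)
          ∈ (PySem.List.pyRange 0 (q + 1) is).map (fun s => pvLabel s (s + is - 1))))
      (matrix.flatMap id)
      = List.countP (fun n => decide (s ≤ n ∧ n ≤ s + is - 1)) (matrix.flatMap id) := by
    apply List.countP_congr
    intro n _
    simp only [Bool.and_eq_true, decide_eq_true_eq]
    constructor
    · rintro ⟨h1, _⟩
      exact (label_bucket_iff n hpos (hdvdR s hs)).mp h1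
    · intro hb
      refine ⟨(label_bucket_iff n hpos (hdvdR s hs)).mpr hb, ?_⟩
      rw [(label_bucket_iff n hpos (hdvdR s hs)).mpr hb]
      exact List.mem_map_of_mem hs
  rw [hcount]
  omega

theorem foldl_binning_empty (is : Int) (flat : List Int) :
    flat.foldl (fun d number =>
        if d.contains (pvLabel (PySem.Int.floordiv number is * is)
            (PySem.Int.floordiv number is * is + is - 1))
        then d.modify (pvLabel (PySem.Int.floordiv number is * is)
            (PySem.Int.floordiv number is * is + is - 1)) 0 (· + 1)
        else d) (PySem.Dict.empty : PySem.Dict String Int) = PySem.Dict.empty := by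
  induction flat with
  | nil => rfl
  | cons n rest ih => simpa [PySem.Dict.contains_empty] using ih

theorem main_equiv_neg (matrix : List (List Int)) (is q : Int) (hneg : is < 0) (hq : 0 ≤ q) :
    count_number_distribution matrix is q = count_number_distribution_alt matrix is q := by
  have hnil : PySem.List.pyRange 0 (q + 1) is = [] := by
    rw [PySem.List.pyRange_of_neg _ _ hneg, if_neg (by omega)]
    rfl
  simp only [count_number_distribution, count_number_distribution_alt, hnil, List.foldl_nil,
    foldl_binning_empty]

-- ===== VERDICT (by name: the statement is the Claim_ definition above) =====
theorem count_number_distribution_spec : Claim_equal_count_number_distribution := by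
  intro matrix interval_size q _ hpre
  unfold Spec_count_number_distribution
  rcases hpre with hpos | ⟨hneg, hq⟩
  · exact main_equiv matrix interval_size q hpos
  · exact main_equiv_neg matrix interval_size q hneg hq
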